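-- pv_equiv track=rewrite | github.com/mprpic/mdlint | src/mdlint/rules/md042.py | _source_idx_to_position
-- ===== SOURCE A (Python) =====
-- def _source_idx_to_position(idx: int, source_lines: list[tuple[int, str]]) -> tuple[int, int]:
--     """Convert a 0-indexed position in concatenated source to (line_num, column).
--
--     Args:
--         idx: 0-indexed position in the concatenated source string.
--         source_lines: List of (1-indexed line number, line content) tuples.
--
--     Returns:
--         Tuple of (1-indexed line number, 1-indexed column).
--     """
--     current = 0
--     for line_num, line in source_lines:
--         line_end = current + len(line)
--         if idx < line_end:
--             return line_num, idx - current + 1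
--         current = line_end + 1  # +1 for the \n separator
--     return source_lines[-1][0], 1
-- ===== SOURCE B (Python) =====
-- from bisect import bisect_right
--
--
-- def _source_idx_to_position(idx: int, source_lines: list[tuple[int, str]]) -> tuple[int, int]:
--     """Offset-table + binary-search version: build the cumulative line-end
--     offsets once, then bisect for the first line whose end exceeds idx."""
--     ends = []
--     start = 0
--     for _, line in source_lines:
--         end = start + len(line)
--         ends.append(end)
--         start = end + 1
--     pos = bisect_right(ends, idx)
--     if pos < len(source_lines):
--         line_num, line = source_lines[pos]
--         return line_num, idx - (ends[pos] - len(line)) + 1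
--     return source_lines[-1][0], 1
-- ===== Notes on version B (the rewrite author's own statement) =====
-- stated objective: alternative
-- what changed: Replaces A's linear accumulate-and-test scan with building a cumulative line-end offset table once and locating the line via bisect_right (binary search), keeping the same fallback and column arithmetic.
import Mathlib
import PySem

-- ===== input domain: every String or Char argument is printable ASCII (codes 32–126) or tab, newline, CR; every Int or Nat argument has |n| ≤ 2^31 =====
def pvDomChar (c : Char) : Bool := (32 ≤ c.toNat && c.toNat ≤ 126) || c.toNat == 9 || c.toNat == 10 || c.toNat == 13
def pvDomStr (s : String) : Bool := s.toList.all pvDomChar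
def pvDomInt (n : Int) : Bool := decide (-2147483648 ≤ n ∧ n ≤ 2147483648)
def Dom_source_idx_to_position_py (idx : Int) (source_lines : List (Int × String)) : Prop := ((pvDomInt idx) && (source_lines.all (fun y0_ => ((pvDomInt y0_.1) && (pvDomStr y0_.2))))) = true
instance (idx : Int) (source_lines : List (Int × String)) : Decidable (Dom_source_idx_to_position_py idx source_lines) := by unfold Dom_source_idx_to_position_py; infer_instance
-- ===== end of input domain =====

-- B replaces A's linear accumulate-and-test scan by a cumulative line-end offset table plus
-- bisect_right (objective: alternative decomposition; same observable behaviour).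

-- ===== PORT A =====
-- the for-loop of A: returns some (line_num, col) on an early return, none when the loop falls through
def sourceIdxLoopA (idx : Int) : Int → List (Int × String) → Option (Int × Int)
  | _, [] => none
  | current, (line_num, line) :: rest =>
      let line_end := current + PySem.Str.len line
      if idx < line_end then some (line_num, idx - current + 1)
      else sourceIdxLoopA idx (line_end + 1) rest

def source_idx_to_position_py (idx : Int) (source_lines : List (Int × String)) : Int × Int :=
  match sourceIdxLoopA idx 0 source_lines with
  | some r => r
  | none =>
      -- return source_lines[-1][0], 1 ; the none branch is source_lines = [] (IndexError, outside Pre_)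
      match PySem.List.pyGet? source_lines (-1) with
      | some p => (p.1, 1)
      | none => (0, 1)

-- ===== PORT B =====
-- the body of B's ends-building for-loop (accumulator = (ends, start))
def stepB (acc : List Int × Int) (p : Int × String) : List Int × Int :=
  let e := acc.2 + PySem.Str.len p.2
  (acc.1 ++ [e], e + 1)

def source_idx_to_position_py_alt (idx : Int) (source_lines : List (Int × String)) : Int × Int :=
  -- ends built by the first for-loop
  let ends := (source_lines.foldl stepB ([], 0)).1
  let pos := PySem.List.bisectRight ends idx
  if pos < source_lines.length then
    match source_lines[pos]?, ends[pos]? with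
    | some (line_num, line), some e => (line_num, idx - (e - PySem.Str.len line) + 1)
    | _, _ => (0, 1)  -- unreachable: pos < len source_lines = len ends
  else
    -- return source_lines[-1][0], 1 ; raises IndexError iff source_lines = [] (outside Pre_)
    match PySem.List.pyGet? source_lines (-1) with
    | some p => (p.1, 1)
    | none => (0, 1)

-- ===== PRECONDITION & SPEC =====
-- Pre_ excludes only source_lines = [], on which both Pythons raise IndexError (source_lines[-1]).
def Pre_source_idx_to_position_py (idx : Int) (source_lines : List (Int × String)) : Prop :=
  source_lines ≠ []
instance (idx : Int) (source_lines : List (Int × String)) : Decidable (Pre_source_idx_to_position_py idx source_lines) := by unfold Pre_source_idx_to_position_py; infer_instance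

def pvWitness_source_idx_to_position_py : Int × (List (Int × String)) := (4, [(1, "ab"), (2, "cde")])

def Spec_source_idx_to_position_py (idx : Int) (source_lines : List (Int × String)) (out : Int × Int) : Prop := out = source_idx_to_position_py_alt idx source_lines
instance (idx : Int) (source_lines : List (Int × String)) (out : Int × Int) : Decidable (Spec_source_idx_to_position_py idx source_lines out) := by unfold Spec_source_idx_to_position_py; infer_instance

-- ===== CLAIM (what is proved, stated in full; the proofs are below) =====
def Claim_equal_source_idx_to_position_py : Prop := ∀ (idx : Int) (source_lines : List (Int × String)), Dom_source_idx_to_position_py idx source_lines → Pre_source_idx_to_position_py idx source_lines → Spec_source_idx_to_position_py idx source_lines (source_idx_to_position_py idx source_lines)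

-- ===== LEMMAS AND PROOFS =====

-- the ends table of B, started at an arbitrary offset
def endsF (cur : Int) (xs : List (Int × String)) : List Int :=
  (xs.foldl stepB ([], cur)).1

lemma endsF_acc (xs : List (Int × String)) : ∀ (pre : List Int) (cur : Int),
    (xs.foldl stepB (pre, cur)).1 = pre ++ endsF cur xs := by
  induction xs with
  | nil => intro pre cur; simp [endsF]
  | cons h t ih =>
      intro pre cur
      rw [show (List.foldl stepB (pre, cur) (h :: t)).1
            = (List.foldl stepB (pre ++ [cur + PySem.Str.len h.2], cur + PySem.Str.len h.2 + 1) t).1 from rfl]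
      rw [show endsF cur (h :: t)
            = (List.foldl stepB ([cur + PySem.Str.len h.2], cur + PySem.Str.len h.2 + 1) t).1 from rfl]
      rw [ih, ih [cur + PySem.Str.len h.2]]
      simp

lemma endsF_cons (cur : Int) (p : Int × String) (rest : List (Int × String)) :
    endsF cur (p :: rest) = (cur + PySem.Str.len p.2) :: endsF (cur + PySem.Str.len p.2 + 1) rest := by
  rw [show endsF cur (p :: rest)
        = (List.foldl stepB ([cur + PySem.Str.len p.2], cur + PySem.Str.len p.2 + 1) rest).1 from rfl]
  rw [endsF_acc rest [cur + PySem.Str.len p.2]]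
  simp

lemma endsF_lb (xs : List (Int × String)) : ∀ (cur : Int), ∀ e ∈ endsF cur xs, cur ≤ e := by
  induction xs with
  | nil => intro cur e he; simp [endsF] at he
  | cons h t ih =>
      intro cur e he
      rw [endsF_cons] at he
      have hL : (0 : Int) ≤ PySem.Str.len h.2 := by
        simp [PySem.Str.len_eq]
      rcases List.mem_cons.mp he with rfl | hmem
      · omega
      · have := ih (cur + PySem.Str.len h.2 + 1) e hmem; omega

lemma endsF_pairwise (xs : List (Int × String)) : ∀ (cur : Int),
    List.Pairwise (fun a b => a ≤ b) (endsF cur xs) := by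
  induction xs with
  | nil => intro cur; simp [endsF]
  | cons h t ih =>
      intro cur
      rw [endsF_cons]
      refine List.pairwise_cons.mpr ⟨fun e he => ?_, ih _⟩
      have := endsF_lb t (cur + PySem.Str.len h.2 + 1) e he
      omega

-- on a ≤-sorted list, bisect_right is the number of elements ≤ x
lemma bisectRight_eq_countP (xs : List Int) (x : Int)
    (h : List.Pairwise (fun a b => a ≤ b) xs) :
    PySem.List.bisectRight xs x = xs.countP (fun e => decide (e ≤ x)) := by
  obtain ⟨hle, hpre, hpost⟩ := PySem.List.bisectRight_spec xs x h
  set p := PySem.List.bisectRight xs x with hp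
  have hsplit : xs = xs.take p ++ xs.drop p := (List.take_append_drop p xs).symm
  have h1 : (xs.take p).countP (fun e => decide (e ≤ x)) = (xs.take p).length := by
    apply List.countP_eq_length.mpr
    intro a ha
    obtain ⟨i, hi, hget⟩ := List.mem_iff_getElem.mp ha
    have hlt : i < p := by
      have := hi; simp [List.length_take] at this; omega
    have hix : i < xs.length := by
      have := hi; simp [List.length_take] at this; omega
    have : xs[i] = a := by rw [← hget]; simp [List.getElem_take]
    simpa [this] using hpre i hix hlt
  have h2 : (xs.drop p).countP (fun e => decide (e ≤ x)) = 0 := by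
    apply List.countP_eq_zero.mpr
    intro a ha
    obtain ⟨i, hi, hget⟩ := List.mem_iff_getElem.mp ha
    have hix : p + i < xs.length := by
      have := hi; simp [List.length_drop] at this; omega
    have : xs[p + i] = a := by rw [← hget]; simp [List.getElem_drop]
    have hgt := hpost (p + i) hix (by omega)
    simp [this] at hgt
    simp
    omega
  calc p = (xs.take p).length := by simp [List.length_take]; omega
    _ = xs.countP (fun e => decide (e ≤ x)) := by
          conv_rhs => rw [hsplit]
          rw [List.countP_append, h1, h2]
          omega

-- the main loop/table correspondence, generalized over the running offset and the fallback
lemma loop_eq_table (idx : Int) (fb : Int × Int) : ∀ (xs : List (Int × String)) (cur : Int),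
    (match sourceIdxLoopA idx cur xs with
     | some r => r
     | none => fb)
    = (let ends := endsF cur xs
       let pos := ends.countP (fun e => decide (e ≤ idx))
       if pos < xs.length then
         match xs[pos]?, ends[pos]? with
         | some (line_num, line), some e => (line_num, idx - (e - PySem.Str.len line) + 1)
         | _, _ => (0, 1)
       else fb) := by
  intro xs
  induction xs with
  | nil => intro cur; simp [sourceIdxLoopA, endsF]
  | cons hd t ih =>
      intro cur
      obtain ⟨n, s⟩ := hd
      rw [endsF_cons]
      simp only [sourceIdxLoopA]
      by_cases hlt : idx < cur + PySem.Str.len s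
      · -- first line hit: every later end is > idx, so pos = 0
        have hrest : (endsF (cur + PySem.Str.len s + 1) t).countP (fun e => decide (e ≤ idx)) = 0 := by
          apply List.countP_eq_zero.mpr
          intro e he
          have := endsF_lb t (cur + PySem.Str.len s + 1) e he
          simp; omega
        rw [if_pos hlt]
        have hpos : List.countP (fun e => decide (e ≤ idx))
            ((cur + PySem.Str.len s) :: endsF (cur + PySem.Str.len s + 1) t) = 0 := by
          rw [List.countP_cons, hrest]
          simp
          simpa using hlt
        rw [hpos]
        simp
      · -- miss: shift to the tail, pos = pos' + 1
        have h0 : ((cur + PySem.Str.len s) ≤ idx) := by omega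
        rw [if_neg hlt]
        rw [ih (cur + PySem.Str.len s + 1)]
        simp only [List.countP_cons, h0, decide_true, List.length_cons]
        set pos' := (endsF (cur + PySem.Str.len s + 1) t).countP (fun e => decide (e ≤ idx))
        by_cases hp : pos' < t.length
        · simp [hp]
        · simp [hp]

-- ===== VERDICT (by name: the statement is the Claim_ definition above) =====
theorem source_idx_to_position_py_spec : Claim_equal_source_idx_to_position_py := by
  intro idx source_lines _ _
  unfold Spec_source_idx_to_position_py
  unfold source_idx_to_position_py source_idx_to_position_py_alt
  have hends : (source_lines.foldl stepB ([], 0)).1 = endsF 0 source_lines := rfl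
  simp only [hends, bisectRight_eq_countP _ _ (endsF_pairwise source_lines 0)]
  exact loop_eq_table idx _ source_lines 0
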